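-- pv_equiv track=rewrite | github.com/dywzju09-blip/cpg_generator_export | tools/verification/interproc_flags.py | _build_method_index
-- ===== SOURCE A (Python) =====
-- from typing import Dict, Iterable, List, Optional, Set, Tuple
--
-- def _build_method_index(calls: List[dict]) -> Dict[str, List[dict]]:
--     methods: Dict[str, List[dict]] = {}
--     for call in calls or []:
--         method = call.get("method")
--         if not method:
--             continue
--         methods.setdefault(method, []).append(call)
--     for items in methods.values():
--         items.sort(key=lambda c: int(c.get("id") or 10**18))
--     return methods
-- ===== SOURCE B (Python) =====
-- def _build_method_index(calls):
--     calls = calls or []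
--     order = list(dict.fromkeys(m for m in (c.get("method") for c in calls) if m))
--     return {m: sorted((c for c in calls if c.get("method") == m),
--                       key=lambda c: int(c.get("id") or 10**18))
--             for m in order}
-- ===== Notes on version B (the rewrite author's own statement) =====
-- stated objective: alternative
-- what changed: A builds groups incrementally with setdefault-append and then sorts each bucket in place; B first dedups the truthy method names in first-occurrence order and builds the result as a dict comprehension, one sorted filter-comprehension per method.
import Mathlib
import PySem

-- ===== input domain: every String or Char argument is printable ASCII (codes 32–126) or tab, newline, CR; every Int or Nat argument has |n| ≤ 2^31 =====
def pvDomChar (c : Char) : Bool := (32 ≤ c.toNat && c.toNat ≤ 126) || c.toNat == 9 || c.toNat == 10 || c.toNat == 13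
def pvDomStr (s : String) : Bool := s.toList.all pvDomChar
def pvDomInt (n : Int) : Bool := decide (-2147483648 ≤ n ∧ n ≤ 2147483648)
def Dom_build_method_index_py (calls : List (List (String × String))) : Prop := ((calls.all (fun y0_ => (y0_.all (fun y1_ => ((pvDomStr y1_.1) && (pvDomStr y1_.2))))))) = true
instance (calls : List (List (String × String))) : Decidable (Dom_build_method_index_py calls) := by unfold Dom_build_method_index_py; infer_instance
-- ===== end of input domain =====

-- B replaces A's incremental setdefault/append grouping + per-bucket in-place sort by an ordered dedup of
-- the method names followed by one sorted filter per method (alternative decomposition, same results).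
-- A sorts the bucket lists in place (mutation); the equivalence proved here is about the return value.


-- shared helpers (both Pythons contain the same `call.get(...)` lookups and the same sort-key lambda)
-- call.get(k): first-match association-list lookup
def pvGet (call : List (String × String)) (k : String) : Option String :=
  (PySem.Dict.mk call).get? k

-- the sort key `int(c.get("id") or 10**18)`; under Pre_ the ofStr? is always `some`, so getD 0 is never taken
def pvKey (c : List (String × String)) : Int :=
  match pvGet c "id" with
  | none => 10 ^ 18
  | some s => if s = "" then 10 ^ 18 else (PySem.Int.ofStr? s).getD 0

-- ===== PORT A =====
def build_method_index_py (calls : List (List (String × String))) : List (String × List (List (String × String))) :=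
  (calls.foldl (fun d call =>
      match pvGet call "method" with
      | none => d
      | some m => if m = "" then d else d.modify m [] (fun items => items ++ [call]))
      (PySem.Dict.empty : PySem.Dict String (List (List (String × String))))).items.map
    (fun p => (p.1, PySem.List.sorted p.2 pvKey false))

-- ===== PORT B =====
def build_method_index_py_alt (calls : List (List (String × String))) : List (String × List (List (String × String))) :=
  (PySem.List.dedup ((calls.map (fun c => pvGet c "method")).filterMap
      (fun o => match o with | none => none | some s => if s = "" then none else some s))).map
    (fun m => (m, PySem.List.sorted (calls.filter (fun c => pvGet c "method" == some m)) pvKey false))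

-- ===== PRECONDITION & SPEC =====
-- Pre_ excludes exactly the inputs where the Python raises ValueError: a call with a truthy "method"
-- whose "id" value is a nonempty string int() cannot parse.
def Pre_build_method_index_py (calls : List (List (String × String))) : Prop :=
  (calls.all (fun c =>
    match pvGet c "method", pvGet c "id" with
    | some m, some s => (m == "") || (s == "") || (PySem.Int.ofStr? s).isSome
    | _, _ => true)) = true
instance (calls : List (List (String × String))) : Decidable (Pre_build_method_index_py calls) := by unfold Pre_build_method_index_py; infer_instance

def pvWitness_build_method_index_py : (List (List (String × String))) :=
  [[("method", "f"), ("id", "2")], [("method", "f"), ("id", "1")], [("method", "g")], [("id", "abc")]]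

def Spec_build_method_index_py (calls : List (List (String × String))) (out : List (String × List (List (String × String)))) : Prop := out = build_method_index_py_alt calls
instance (calls : List (List (String × String))) (out : List (String × List (List (String × String)))) : Decidable (Spec_build_method_index_py calls out) := by unfold Spec_build_method_index_py; infer_instance

-- ===== CLAIM (what is proved, stated in full; the proofs are below) =====
def Claim_equal_build_method_index_py : Prop := ∀ (calls : List (List (String × String))), Dom_build_method_index_py calls → Pre_build_method_index_py calls → Spec_build_method_index_py calls (build_method_index_py calls)

-- ===== LEMMAS AND PROOFS =====

-- truthiness of `call.get("method")`
def pvTruthy (c : List (String × String)) : Bool :=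
  match pvGet c "method" with | none => false | some s => s ≠ ""

-- the method name of a truthy call
def pvM (c : List (String × String)) : String := (pvGet c "method").getD ""

-- A's loop skips exactly the non-truthy calls
theorem foldA_eq_foldl_filter (calls : List (List (String × String)))
    (d : PySem.Dict String (List (List (String × String)))) :
    calls.foldl (fun d call =>
      match pvGet call "method" with
      | none => d
      | some m => if m = "" then d else d.modify m [] (fun items => items ++ [call])) d
    = (calls.filter pvTruthy).foldl
        (fun d c => d.modify (pvM c) [] (fun items => items ++ [c])) d := by
  induction calls generalizing d with
  | nil => rfl
  | cons c t ih =>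
    cases h : pvGet c "method" with
    | none =>
      simp only [List.foldl_cons, List.filter_cons, pvTruthy, h, Bool.false_eq_true, if_false]
      exact ih d
    | some m =>
      by_cases hm : m = ""
      · simp only [List.foldl_cons, List.filter_cons, pvTruthy, h, hm, decide_not, decide_true,
          Bool.not_true, Bool.false_eq_true, if_false]
        exact ih d
      · simp only [List.foldl_cons, List.filter_cons, pvTruthy, h, decide_not, hm, decide_false,
          Bool.not_false, if_true, pvM]
        exact ih _

-- the truthy-method list B dedups is the map of pvM over the truthy calls
theorem filterMap_methods_eq (calls : List (List (String × String))) :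
    (calls.map (fun c => pvGet c "method")).filterMap
      (fun o => match o with | none => none | some s => if s = "" then none else some s)
    = (calls.filter pvTruthy).map pvM := by
  induction calls with
  | nil => rfl
  | cons c t ih =>
    cases h : pvGet c "method" with
    | none =>
      simp only [List.map_cons, List.filterMap_cons, List.filter_cons, pvTruthy, h,
        Bool.false_eq_true, if_false]
      exact ih
    | some m =>
      by_cases hm : m = ""
      · simp only [List.map_cons, List.filterMap_cons, List.filter_cons, pvTruthy, h, hm,
          decide_not, decide_true, Bool.not_true, Bool.false_eq_true, if_false]
        exact ih
      · simp only [List.map_cons, List.filterMap_cons, List.filter_cons, pvTruthy, h, decide_not,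
          hm, decide_false, Bool.not_false, if_true, pvM]
        rw [ih]
        simp

-- the two per-method filters agree for a nonempty method name
theorem filter_eq_filter (calls : List (List (String × String))) (m : String) (hm : m ≠ "") :
    ((calls.filter pvTruthy).filter (fun c => pvM c == m))
    = calls.filter (fun c => pvGet c "method" == some m) := by
  rw [List.filter_filter]
  apply List.filter_congr
  intro c _
  unfold pvTruthy pvM
  cases h : pvGet c "method" with
  | none => simp
  | some s =>
    by_cases hs : s = m
    · subst hs; simp [hm]
    · simp [hs]

-- ===== VERDICT (by name: the statement is the Claim_ definition above) =====
theorem build_method_index_py_spec : Claim_equal_build_method_index_py := by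
  intro calls _ _
  unfold Spec_build_method_index_py build_method_index_py build_method_index_py_alt
  rw [foldA_eq_foldl_filter, filterMap_methods_eq]
  set tc := calls.filter pvTruthy with htc
  set D := tc.foldl (fun d c => d.modify (pvM c) [] (fun items => items ++ [c])) PySem.Dict.empty with hD
  have hmapfold :
      D = (tc.map (fun c => (pvM c, c))).foldl
          (fun d p => d.modify p.1 [] (fun items => items ++ [p.2])) PySem.Dict.empty := by
    rw [hD, List.foldl_map]
  have hkeys : D.keys = PySem.Set.ofList (tc.map pvM) := by
    rw [hD, PySem.Dict.keys_foldl_modify_key tc pvM [] (fun d c => (fun items => items ++ [c])) PySem.Dict.empty]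
    simp [PySem.Dict.keys_empty, PySem.Set.update_nil_left]
  have hnodup : D.keys.Nodup := by
    rw [hkeys]; exact PySem.Set.nodup_ofList _
  have hgetD : ∀ m, D.getD m [] = (tc.filter (fun c => pvM c == m)) := by
    intro m
    rw [hmapfold,
      PySem.Dict.getD_foldl_modify_append (tc.map (fun c => (pvM c, c))) PySem.Dict.empty m]
    rw [List.filter_map]
    rw [List.map_map]
    rw [show ((fun x : String × List (String × String) => x.2) ∘ fun c => (pvM c, c)) = id from rfl,
      List.map_id, PySem.Dict.getD_empty, List.nil_append]
    rfl
  rw [PySem.Dict.items_eq_map_keys D hnodup [], hkeys]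
  rw [← PySem.List.dedup_eq_ofList]
  rw [List.map_map]
  apply List.map_congr_left
  intro m hmem
  have hm : m ≠ "" := by
    have hmem2 : m ∈ tc.map pvM := (PySem.List.mem_dedup _ _).1 hmem
    obtain ⟨c, hc, hcm⟩ := List.mem_map.1 hmem2
    have ht : pvTruthy c = true := (List.mem_filter.1 hc).2
    unfold pvTruthy at ht
    unfold pvM at hcm
    cases h : pvGet c "method" with
    | none => simp [h] at ht
    | some s => simp [h] at ht hcm; subst hcm; exact ht
  simp only [Function.comp]
  rw [hgetD m, filter_eq_filter calls m hm]
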